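-- pv_equiv track=rewrite | github.com/sharur7/reference_notebook | ref4.py | detect_calibration_cycles
-- ===== SOURCE A (Python) =====
-- def detect_calibration_cycles(set_point_values):
--     """
--     Detects calibration cycles based on set point values.
--     A cycle is defined as a sequence starting and ending at the same set point value, not including the starting point itself.
--     """
--     cycles = []  # List to hold the start and end indices of each cycle
--     start_index = None  # Starting index of a potential cycle
--
--     for i, value in enumerate(set_point_values):
--         if start_index is None:
--             # Potential start of a new cycle
--             start_index = i
--         elif value == set_point_values[start_index]:
--             # End of a cycle, append start and end indices to the cycles list
--             if i > start_index:  # Ensures the cycle includes more than just the starting point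
--                 cycles.append((start_index, i))
--                 start_index = None  # Reset for the next cycle
--
--     return cycles
-- ===== SOURCE B (Python) =====
-- def detect_calibration_cycles(set_point_values):
--     """Two staged passes: a backward pass with a dict of nearest-equal-to-the-right
--     builds next_same, then a forward jump walk over next_same emits the pairs."""
--     n = len(set_point_values)
--     next_same = [None] * n
--     seen = {}
--     for i in range(n - 1, -1, -1):
--         next_same[i] = seen.get(set_point_values[i])
--         seen[set_point_values[i]] = i
--     cycles = []
--     i = 0
--     while i < n:
--         j = next_same[i]
--         if j is None:
--             break
--         cycles.append((i, j))
--         i = j + 1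
--     return cycles
-- ===== Notes on version B (the rewrite author's own statement) =====
-- stated objective: alternative
-- what changed: Replaced the single-pass sentinel state machine with two staged passes: a backward pass builds a next-equal-index table via a dict of nearest occurrence to the right, then a forward jump walk over that table emits the pairs.
import Mathlib
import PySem

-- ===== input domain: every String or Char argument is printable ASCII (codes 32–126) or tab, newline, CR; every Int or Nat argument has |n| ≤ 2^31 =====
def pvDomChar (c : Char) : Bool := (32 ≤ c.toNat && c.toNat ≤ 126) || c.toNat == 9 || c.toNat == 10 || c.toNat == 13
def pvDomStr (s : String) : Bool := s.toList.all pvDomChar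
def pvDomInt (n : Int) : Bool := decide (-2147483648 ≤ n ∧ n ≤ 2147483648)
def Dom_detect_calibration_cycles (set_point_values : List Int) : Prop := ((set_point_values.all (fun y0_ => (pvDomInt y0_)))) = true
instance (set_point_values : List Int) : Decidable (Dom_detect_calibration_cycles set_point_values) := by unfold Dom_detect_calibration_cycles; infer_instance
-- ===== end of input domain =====

-- B replaces A's sentinel state machine with two staged passes: a backward pass builds a
-- next-equal-index table via a dict, then a forward jump walk emits the pairs (objective: alternative).

-- ===== PORT A =====
-- One fold step of A's for loop: state = (cycles, start_index).
def aStep (v : List Int) (st : List (Int × Int) × Option Int) (p : Int × Int) :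
    List (Int × Int) × Option Int :=
  match st.2 with
  | none => (st.1, some p.1)
  | some s =>
    if some p.2 = PySem.List.pyGet? v s then
      if s < p.1 then (st.1 ++ [(s, p.1)], none) else st
    else st

def detect_calibration_cycles (set_point_values : List Int) : List (Int × Int) :=
  (List.foldl (aStep set_point_values) ([], none)
    (PySem.List.enumerate set_point_values 0)).1

-- ===== PORT B =====
-- Proof-side helper cited by the specification lemma the port's termination needs:
-- first index k ≥ j with v[k] = x (none = no such index).
def scanFrom (v : List Int) (x : Int) (j : Nat) : Option Nat :=
  if h : j < v.length then
    if v[j] = x then some j else scanFrom v x (j + 1)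
  else none
termination_by v.length - j

theorem scanFrom_bounds (v : List Int) (x : Int) (j k : Nat)
    (h : scanFrom v x j = some k) : j ≤ k ∧ k < v.length := by
  fun_induction scanFrom v x j with
  | case1 j hj hv => injection h with h; omega
  | case2 j hj hv ih => have := ih h; omega
  | case3 j hj => simp_all

-- B's backward `for i in range(n-1, -1, -1)` pass, as the obvious structural recursion
-- going from index k up: state after processing indices ≥ k is (seen, next_same[k:]).
def buildLoop (v : List Int) (k : Nat) : PySem.Dict Int Nat × List (Option Nat) :=
  if h : k < v.length then
    let p := buildLoop v (k + 1)
    (p.1.insert v[k] k, p.1.get? v[k] :: p.2)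
  else (PySem.Dict.empty, [])
termination_by v.length - k

-- Specification of the backward pass (the port's jump loop needs its corollary ns_lt
-- for termination, so it stays above the port).
theorem buildLoop_spec (v : List Int) (k : Nat) :
    (∀ x : Int, (buildLoop v k).1.get? x = scanFrom v x k)
    ∧ (buildLoop v k).2 =
        (List.range (v.length - k)).map (fun m => scanFrom v (v.getD (k + m) 0) (k + m + 1)) := by
  fun_induction buildLoop v k with
  | case1 k h p ih =>
    constructor
    · intro x
      rw [PySem.Dict.get?_insert, (ih.1 x)]
      have hs : scanFrom v x k = if v[k] = x then some k else scanFrom v x (k + 1) := by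
        rw [scanFrom]; simp [h]
      rw [hs]
      by_cases hx : x = v[k]
      · simp [hx]
      · rw [if_neg hx, if_neg (fun hh => hx hh.symm)]
    · have hr : v.length - k = (v.length - (k + 1)) + 1 := by omega
      rw [ih.2, hr, List.range_succ_eq_map, List.map_cons, List.map_map]
      refine congrArg₂ List.cons ?_ ?_
      · rw [ih.1 v[k]]
        simp [List.getElem?_eq_getElem h]
      · apply List.map_congr_left
        intro m _
        simp only [Function.comp]
        congr 2 <;> omega
  | case2 k h =>
    constructor
    · intro x
      rw [PySem.Dict.get?_empty, scanFrom]
      simp [Nat.not_lt.mp h]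
    · simp [Nat.sub_eq_zero_of_le (Nat.not_lt.mp h)]

theorem ns_lt (v : List Int) : ∀ (k j : Nat),
    ((buildLoop v 0).2)[k]? = some (some j) → k < j := by
  intro k j hk
  rw [(buildLoop_spec v 0).2, List.getElem?_map] at hk
  rcases hx : (List.range (v.length - 0))[k]? with _ | m
  · rw [hx] at hk; simp at hk
  · rw [hx] at hk
    rcases List.getElem?_eq_some_iff.mp hx with ⟨hlt, hv⟩
    rw [List.getElem_range] at hv
    simp only [Option.map_some, Option.some.injEq] at hk
    have := scanFrom_bounds v (v.getD (0 + m) 0) (0 + m + 1) j hk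
    omega

-- B's forward jump walk: while i < n, read next_same[i], emit (i, j), resume at j + 1.
def jumpLoop (ns : List (Option Nat)) (hns : ∀ (k j : Nat), ns[k]? = some (some j) → k < j)
    (i : Nat) : List (Int × Int) :=
  if h : i < ns.length then
    match hm : ns[i] with
    | some j => ((i : Int), (j : Int)) :: jumpLoop ns hns (j + 1)
    | none => []
  else []
termination_by ns.length - i
decreasing_by
  have := hns i j (by rw [List.getElem?_eq_getElem h, hm])
  omega

def detect_calibration_cycles_alt (set_point_values : List Int) : List (Int × Int) :=
  jumpLoop (buildLoop set_point_values 0).2 (ns_lt set_point_values) 0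

-- ===== PRECONDITION & SPEC =====
def Spec_detect_calibration_cycles (set_point_values : List Int) (out : List (Int × Int)) : Prop := out = detect_calibration_cycles_alt set_point_values
instance (set_point_values : List Int) (out : List (Int × Int)) : Decidable (Spec_detect_calibration_cycles set_point_values out) := by unfold Spec_detect_calibration_cycles; infer_instance

-- ===== CLAIM (what is proved, stated in full; the proofs are below) =====
def Claim_equal_detect_calibration_cycles : Prop := ∀ (set_point_values : List Int), Dom_detect_calibration_cycles set_point_values → Spec_detect_calibration_cycles set_point_values (detect_calibration_cycles set_point_values)

-- ===== LEMMAS AND PROOFS =====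

theorem scanFrom_stop (v : List Int) (x : Int) (j : Nat) (hj : j < v.length)
    (hx : v[j] = x) : scanFrom v x j = some j := by
  unfold scanFrom; simp [hj, hx]

theorem scanFrom_step (v : List Int) (x : Int) (j : Nat) (hj : j < v.length)
    (hx : v[j] ≠ x) : scanFrom v x j = scanFrom v x (j + 1) := by
  rw [scanFrom]; simp [hj, hx]

theorem scanFrom_none (v : List Int) (x : Int) (j : Nat) (hj : v.length ≤ j) :
    scanFrom v x j = none := by
  unfold scanFrom; simp [Nat.not_lt.mpr hj]

-- Reference recursion the two ports are both reduced to.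
def altLoop (v : List Int) (i : Nat) : List (Int × Int) :=
  if hi : i < v.length then
    match h : scanFrom v v[i] (i + 1) with
    | some j => ((i : Int), (j : Int)) :: altLoop v (j + 1)
    | none => []
  else []
termination_by v.length - i
decreasing_by
  have := scanFrom_bounds v v[i] (i + 1) j h
  omega

theorem altLoop_stop (v : List Int) (i : Nat) (hi : v.length ≤ i) :
    altLoop v i = [] := by
  unfold altLoop; simp [Nat.not_lt.mpr hi]

-- the continuation of A's fold when the state is `some s`
def contOf (v : List Int) (s i : Nat) : List (Int × Int) :=
  match scanFrom v (v.getD s 0) i with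
  | some j => ((s : Int), (j : Int)) :: altLoop v (j + 1)
  | none => []

theorem altLoop_unfold (v : List Int) (i : Nat) (hi : i < v.length) :
    altLoop v i = contOf v i (i + 1) := by
  unfold altLoop contOf
  rw [List.getD_eq_getElem v 0 hi]
  simp only [dif_pos hi]
  split <;> rename_i heq <;> simp [heq]

-- Main invariant: folding A's step over the enumerated suffix of v starting at i.
theorem main_inv (v : List Int) (t : List Int) : ∀ (i : Nat), t = v.drop i →
    (∀ (acc : List (Int × Int)),
      (List.foldl (aStep v) (acc, none) (PySem.List.enumerate t i)).1
        = acc ++ altLoop v i)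
    ∧ (∀ (acc : List (Int × Int)) (s : Nat), s < i → s < v.length →
      (List.foldl (aStep v) (acc, some (s : Int)) (PySem.List.enumerate t i)).1
        = acc ++ contOf v s i) := by
  induction t with
  | nil =>
    intro i ht
    have hlen : v.length ≤ i := by
      by_contra h
      have := List.drop_eq_nil_iff.mp ht.symm
      omega
    constructor
    · intro acc
      simp [PySem.List.enumerate_nil, altLoop_stop v i hlen]
    · intro acc s _ _
      simp [PySem.List.enumerate_nil, contOf, scanFrom_none v _ i hlen]
  | cons x rest ih =>
    intro i ht
    have hi : i < v.length := by
      by_contra hcon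
      rw [List.drop_eq_nil_iff.mpr (by omega)] at ht
      simp at ht
    have hvd : x :: rest = v[i] :: v.drop (i + 1) := by
      rw [ht]; exact (List.getElem_cons_drop hi).symm
    injection hvd with hx hrest
    constructor
    · -- state none: element i becomes the new start
      intro acc
      rw [PySem.List.enumerate_cons]
      simp only [List.foldl_cons, aStep]
      have := ((ih (i + 1) hrest).2 acc i (by omega) hi)
      push_cast at this ⊢
      rw [this, altLoop_unfold v i hi]
    · -- state some s
      intro acc s hsi hsv
      rw [PySem.List.enumerate_cons]
      simp only [List.foldl_cons, aStep, PySem.List.pyGet?_natCast,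
        List.getElem?_eq_getElem hsv]
      by_cases hxe : x = v[s]
      · -- match found at i: A appends (s,i), resets; scanFrom finds i
        have hlt : (s : Int) < (i : Int) := by exact_mod_cast hsi
        simp only [hxe, if_pos hlt]
        have := (ih (i + 1) hrest).1 (acc ++ [((s : Int), (i : Int))])
        push_cast at this ⊢
        rw [this, contOf,
          scanFrom_stop v (v.getD s 0) i hi
            (by rw [← hx, hxe, List.getD_eq_getElem v 0 hsv]),
          List.append_assoc]
        simp
      · -- no match: state unchanged, scanFrom skips i
        simp only [Option.some.injEq, if_neg hxe]
        have := (ih (i + 1) hrest).2 acc s (by omega) hsv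
        push_cast at this ⊢
        rw [this, contOf, contOf,
          scanFrom_step v (v.getD s 0) i hi
            (by rw [← hx, List.getD_eq_getElem v 0 hsv]; exact hxe)]

theorem ns_length (v : List Int) : (buildLoop v 0).2.length = v.length := by
  rw [(buildLoop_spec v 0).2]; simp

theorem ns_get (v : List Int) (i : Nat) (h : i < v.length) :
    (buildLoop v 0).2[i]'(by rw [ns_length]; exact h) = scanFrom v v[i] (i + 1) := by
  simp only [(buildLoop_spec v 0).2]
  rw [List.getElem_map, List.getElem_range]
  simp [List.getElem?_eq_getElem h]

-- B's jump walk over the next-equal table equals the reference recursion.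
theorem jumpLoop_eq_altLoop (v : List Int) (i : Nat) :
    jumpLoop (buildLoop v 0).2 (ns_lt v) i = altLoop v i := by
  fun_induction jumpLoop (buildLoop v 0).2 (ns_lt v) i with
  | case1 i h j hm ih =>
    have hv : i < v.length := by have := ns_length v; omega
    rw [ns_get v i hv] at hm
    rw [altLoop]
    simp only [dif_pos hv]
    split <;> rename_i heq
    · have := hm.symm.trans heq
      injection this with e
      subst e
      rw [ih]
    · exact absurd (hm.symm.trans heq) (by simp)
  | case2 i h hm =>
    have hv : i < v.length := by have := ns_length v; omega
    rw [ns_get v i hv] at hm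
    rw [altLoop]
    simp only [dif_pos hv]
    split <;> rename_i heq
    · exact absurd (hm.symm.trans heq) (by simp)
    · rfl
  | case3 i h =>
    have hv : v.length ≤ i := by have := ns_length v; omega
    rw [altLoop_stop v i hv]

-- ===== VERDICT (by name: the statement is the Claim_ definition above) =====
theorem detect_calibration_cycles_spec : Claim_equal_detect_calibration_cycles := by
  intro v _
  unfold Spec_detect_calibration_cycles detect_calibration_cycles detect_calibration_cycles_alt
  rw [jumpLoop_eq_altLoop v 0]
  have := (main_inv v v 0 (by simp)).1 []
  simpa using this
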